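-- pv_equiv track=rewrite | github.com/ch11en/CAD | src/train_cad.py | get_at_labels
-- ===== SOURCE A (Python) =====
-- def get_at_labels(labels):
--     at_dict = {'NULL': 0, 'EXPLICIT': 1, 'BOTH': 2}
--     at_labels = []
--     for label in labels:
--         at = set([quad[0] for quad in label])
--         if 'NULL' not in at:
--             at = at_dict['EXPLICIT']
--         else:
--             at = at_dict['NULL'] if len(at) == 1 else at_dict['BOTH']
--         at_labels.append(at)
--     return at_labels
-- ===== SOURCE B (Python) =====
-- def _at_class(k, n):
--     if k == 0:
--         return 1
--     return 0 if k == n else 2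
--
--
-- def get_at_labels(labels):
--     return [_at_class(sum(1 for quad in label if quad[0] == 'NULL'), len(label))
--             for label in labels]
-- ===== Notes on version B (the rewrite author's own statement) =====
-- stated objective: alternative
-- what changed: Instead of building a set of distinct first-elements and testing membership/size, B counts the NULL-first quads per label and classifies by comparing the count against 0 and the label length, returning a comprehension rather than appending in a loop.
import Mathlib
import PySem

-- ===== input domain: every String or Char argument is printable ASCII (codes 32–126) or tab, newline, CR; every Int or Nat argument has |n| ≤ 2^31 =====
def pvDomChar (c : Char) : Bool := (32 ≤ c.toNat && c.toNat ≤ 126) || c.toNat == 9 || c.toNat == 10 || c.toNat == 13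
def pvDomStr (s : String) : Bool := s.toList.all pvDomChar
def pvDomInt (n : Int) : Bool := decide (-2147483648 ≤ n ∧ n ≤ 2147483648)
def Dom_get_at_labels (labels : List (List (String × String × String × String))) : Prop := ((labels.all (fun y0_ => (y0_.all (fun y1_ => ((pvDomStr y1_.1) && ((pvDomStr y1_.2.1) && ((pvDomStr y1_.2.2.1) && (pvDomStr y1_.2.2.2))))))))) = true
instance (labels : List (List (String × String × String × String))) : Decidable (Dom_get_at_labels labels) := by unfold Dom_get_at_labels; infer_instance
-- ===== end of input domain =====

-- B classifies each label by counting its NULL-first quads and comparing the count with 0 and the label length, instead of A's set of distinct first-elements; return values proved equal.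

-- ===== PORT A =====
def get_at_labels (labels : List (List (String × String × String × String))) : List Int :=
  labels.foldl (fun at_labels label =>
    let at_ : PySem.Set String := PySem.Set.ofList (label.map (fun quad => quad.1))
    let at2 : Int :=
      if ¬ (PySem.Set.contains at_ "NULL" = true) then 1
      else if PySem.Set.len at_ = 1 then 0 else 2
    at_labels ++ [at2]) []

-- ===== PORT B =====
def atClass (k n : Int) : Int :=
  if k = 0 then 1 else if k = n then 0 else 2

def get_at_labels_alt (labels : List (List (String × String × String × String))) : List Int :=
  labels.map (fun label =>
    atClass (label.foldl (fun k quad => if quad.1 == "NULL" then k + 1 else k) 0)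
            (label.length : Int))

-- ===== PRECONDITION & SPEC =====
def Spec_get_at_labels (labels : List (List (String × String × String × String))) (out : List Int) : Prop := out = get_at_labels_alt labels
instance (labels : List (List (String × String × String × String))) (out : List Int) : Decidable (Spec_get_at_labels labels out) := by unfold Spec_get_at_labels; infer_instance

-- ===== CLAIM (what is proved, stated in full; the proofs are below) =====
def Claim_equal_get_at_labels : Prop := ∀ (labels : List (List (String × String × String × String))), Dom_get_at_labels labels → Spec_get_at_labels labels (get_at_labels labels)

-- ===== LEMMAS AND PROOFS =====

-- the per-label classification of each port, named for the proofs
def clsA (label : List (String × String × String × String)) : Int :=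
  let at_ : PySem.Set String := PySem.Set.ofList (label.map (fun quad => quad.1))
  if ¬ (PySem.Set.contains at_ "NULL" = true) then 1
  else if PySem.Set.len at_ = 1 then 0 else 2

theorem foldA (labels : List (List (String × String × String × String)))
    (acc : List Int) :
    labels.foldl (fun at_labels label =>
      let at_ : PySem.Set String := PySem.Set.ofList (label.map (fun quad => quad.1))
      let at2 : Int :=
        if ¬ (PySem.Set.contains at_ "NULL" = true) then 1
        else if PySem.Set.len at_ = 1 then 0 else 2
      at_labels ++ [at2]) acc = acc ++ labels.map clsA := by
  induction labels generalizing acc with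
  | nil => simp
  | cons l t ih =>
    rw [List.foldl_cons, ih]
    simp [clsA]

-- B's counting fold in closed form: it adds countP to the seed
theorem count_fold (label : List (String × String × String × String)) (a : Int) :
    label.foldl (fun k quad => if quad.1 == "NULL" then k + 1 else k) a
      = a + (label.countP (fun quad => quad.1 == "NULL") : Int) := by
  induction label generalizing a with
  | nil => simp
  | cons q l ih =>
    rw [List.foldl_cons, List.countP_cons]
    by_cases h : q.1 = "NULL"
    · rw [if_pos (by simp [h]), ih]
      simp [h]
      ring
    · rw [if_neg (by simp [h]), ih]
      simp [h]

-- a nodup list containing "NULL" has length 1 iff every underlying element is "NULL"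
theorem len_one_all_null (l : List String) (hx : "NULL" ∈ PySem.Set.ofList l) :
    ((PySem.Set.ofList l).length = 1) ↔ ∀ x ∈ l, x = "NULL" := by
  have hnd := PySem.Set.nodup_ofList (xs := l)
  constructor
  · intro hlen x hxl
    obtain ⟨y, hy⟩ := List.length_eq_one_iff.mp hlen
    have hxy : x ∈ PySem.Set.ofList l := (PySem.Set.mem_ofList l x).mpr hxl
    rw [hy] at hx hxy
    simp only [List.mem_singleton] at hx hxy
    rw [hxy, hx]
  · intro hall
    have hset : PySem.Set.ofList l = ["NULL"] := by
      have hsub : ∀ y ∈ PySem.Set.ofList l, y = "NULL" := by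
        intro y hy
        exact hall y ((PySem.Set.mem_ofList l y).mp hy)
      cases hset : PySem.Set.ofList l with
      | nil => rw [hset] at hx; simp at hx
      | cons z t =>
        rw [hset] at hsub hnd
        have hz := hsub z (by simp)
        subst hz
        cases t with
        | nil => rfl
        | cons w t' =>
          have hw := hsub w (by simp)
          simp [hw] at hnd
    simp [hset]

theorem per_label (label : List (String × String × String × String)) :
    clsA label
      = atClass (label.foldl (fun k quad => if quad.1 == "NULL" then k + 1 else k) 0)
          (label.length : Int) := by
  unfold clsA atClass
  rw [count_fold]
  simp only [Int.zero_add]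
  set c := label.countP (fun quad => quad.1 == "NULL") with hc
  by_cases hn : "NULL" ∈ label.map (fun quad => quad.1)
  · have hmem : "NULL" ∈ PySem.Set.ofList (label.map (fun quad => quad.1)) :=
      (PySem.Set.mem_ofList _ _).mpr hn
    have hcont : PySem.Set.contains (PySem.Set.ofList (label.map (fun quad => quad.1))) "NULL" = true :=
      (PySem.Set.contains_iff _ _).mpr hmem
    have hcpos : 0 < c := by
      rw [hc, List.countP_pos_iff]
      obtain ⟨q, hq, hq1⟩ := List.mem_map.mp hn
      exact ⟨q, hq, by simp [hq1]⟩
    have hc0 : ¬ ((c : Int) = 0) := by omega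
    by_cases hall : ∀ x ∈ label.map (fun quad => quad.1), x = "NULL"
    · have h1 : (PySem.Set.ofList (label.map (fun quad => quad.1))).length = 1 :=
        (len_one_all_null _ hmem).mpr hall
      have h1Z : PySem.Set.len (PySem.Set.ofList (label.map (fun quad => quad.1))) = (1 : Int) := by
        simp only [PySem.Set.len]; exact_mod_cast h1
      have hcn : c = label.length := by
        rw [hc]
        apply List.countP_eq_length.mpr
        intro q hq
        have := hall q.1 (List.mem_map.mpr ⟨q, hq, rfl⟩)
        simp [this]
      rw [if_neg (not_not_intro hcont), if_pos h1Z, if_neg hc0, if_pos (by exact_mod_cast hcn)]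
    · have hne : ¬ ((PySem.Set.ofList (label.map (fun quad => quad.1))).length = 1) := by
        rw [len_one_all_null _ hmem]; exact hall
      have hneZ : ¬ (PySem.Set.len (PySem.Set.ofList (label.map (fun quad => quad.1))) = (1 : Int)) := by
        simp only [PySem.Set.len]; exact_mod_cast hne
      have hclt : c < label.length := by
        rcases Nat.lt_or_ge c label.length with h | h
        · exact h
        · exfalso
          have : c = label.length := le_antisymm (hc ▸ List.countP_le_length) h
          apply hall
          intro x hxm
          obtain ⟨q, hq, rfl⟩ := List.mem_map.mp hxm
          have := List.countP_eq_length.mp (hc ▸ this) q hq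
          simpa using this
      rw [if_neg (not_not_intro hcont), if_neg hneZ, if_neg hc0,
        if_neg (by exact_mod_cast Nat.ne_of_lt hclt)]
  · have hcont : PySem.Set.contains (PySem.Set.ofList (label.map (fun quad => quad.1))) "NULL" = false := by
      cases h : PySem.Set.contains (PySem.Set.ofList (label.map (fun quad => quad.1))) "NULL"
      · rfl
      · exact absurd ((PySem.Set.mem_ofList _ _).mp ((PySem.Set.contains_iff _ _).mp h)) hn
    have hc0 : c = 0 := by
      rw [hc, List.countP_eq_zero]
      intro q hq hq1
      exact hn (List.mem_map.mpr ⟨q, hq, by simpa using hq1⟩)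
    rw [if_pos (by rw [hcont]; simp), if_pos (by exact_mod_cast hc0)]

-- ===== VERDICT (by name: the statement is the Claim_ definition above) =====
theorem get_at_labels_spec : Claim_equal_get_at_labels := by
  intro labels _
  unfold Spec_get_at_labels get_at_labels get_at_labels_alt
  rw [foldA]
  simp [per_label]
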